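-- pv_equiv track=rewrite | github.com/JinShuo0510/insect_AS_analyze | jupyter_scripts/exon_extraction/script.py | partition_aligned_sequence
-- ===== SOURCE A (Python) =====
-- def partition_aligned_sequence(aligned_seq, exon_lengths):
--     """
--     给定比对序列 aligned_seq（包含 gap '-'）以及各个 exon 的原始长度 exon_lengths（列表），
--     根据累计非 gap 字符数将 aligned_seq 分段，返回分段后的列表，每段对应一个 exon。
--     """
--     segments = []
--     current_segment = []
--     raw_count = 0  # 计数非 gap 字符个数
--     exon_index = 0
--     # target 为当前 exon 截取时非 gap字符的累计目标值
--     target = exon_lengths[exon_index] if exon_lengths else 0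
--
--     for char in aligned_seq:
--         # 如果已经分完所有 exon，则忽略后面可能存在的多余 gap（例如末端 gap）
--         if exon_index >= len(exon_lengths):
--             break
--         current_segment.append(char)
--         if char != '-':
--             raw_count += 1
--             if raw_count == target:
--                 # 到达当前 exon 的边界，保存当前 segment
--                 segments.append("".join(current_segment))
--                 current_segment = []
--                 exon_index += 1
--                 if exon_index < len(exon_lengths):
--                     target += exon_lengths[exon_index]
--     return segments
-- ===== SOURCE B (Python) =====
-- def partition_aligned_sequence(aligned_seq, exon_lengths):
--     # Per-exon decomposition: precompute the indices of non-gap characters once,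
--     # then for each exon jump straight to the index of its last non-gap character
--     # and slice the aligned sequence between consecutive boundaries.
--     pos = [i for i, ch in enumerate(aligned_seq) if ch != '-']
--     segments = []
--     start = 0
--     acc = 0  # cumulative non-gap characters covered by completed exons
--     for L in exon_lengths:
--         acc += L
--         if L <= 0 or acc > len(pos):
--             # this exon boundary can never be hit while scanning; stop here
--             break
--         end = pos[acc - 1] + 1
--         segments.append(aligned_seq[start:end])
--         start = end
--     return segments
-- ===== Notes on version B (the rewrite author's own statement) =====
-- stated objective: alternative
-- what changed: Replaces A's per-character state machine that accumulates each segment char-by-char and joins it with a per-exon loop over prefix sums: the non-gap positions are indexed once, each exon's end boundary is read off directly as pos[acc-1]+1, and segments are produced by slicing the aligned sequence between consecutive boundaries.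
import Mathlib
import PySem

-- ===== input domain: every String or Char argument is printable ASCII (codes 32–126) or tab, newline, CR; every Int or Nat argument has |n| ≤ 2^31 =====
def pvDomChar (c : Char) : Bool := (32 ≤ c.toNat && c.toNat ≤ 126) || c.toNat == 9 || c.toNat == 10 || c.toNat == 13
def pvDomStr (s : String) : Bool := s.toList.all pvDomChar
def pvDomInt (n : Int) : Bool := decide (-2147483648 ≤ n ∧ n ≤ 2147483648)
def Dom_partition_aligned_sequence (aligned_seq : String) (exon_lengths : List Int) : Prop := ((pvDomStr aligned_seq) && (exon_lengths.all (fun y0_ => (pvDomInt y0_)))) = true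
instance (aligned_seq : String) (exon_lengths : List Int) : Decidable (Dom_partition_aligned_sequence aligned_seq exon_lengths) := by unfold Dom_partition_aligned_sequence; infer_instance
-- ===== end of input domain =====

-- B replaces A's per-character segment accumulator with a per-exon loop that reads each
-- boundary off a precomputed list of non-gap positions and slices between boundaries
-- (objective: alternative decomposition, same asymptotic cost).

-- ===== PORT A =====
-- the for-loop of A: state (segments, current_segment, raw_count, exon_index, target)
def pvA_loop (lens : List Int) : List Char → List String → List Char → Int → Nat → Int → List String
  | [], segs, _cur, _raw, _ei, _target => segs
  | c :: rest, segs, cur, raw, ei, target =>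
    if ei ≥ lens.length then segs
    else
      let cur' := cur ++ [c]
      if c ≠ '-' then
        let raw' := raw + 1
        if raw' = target then
          let segs' := segs ++ [String.ofList cur']        -- "".join(current_segment)
          let ei' := ei + 1
          let target' := if ei' < lens.length then target + lens.getD ei' 0 else target
          pvA_loop lens rest segs' [] raw' ei' target'
        else pvA_loop lens rest segs cur' raw' ei target
      else pvA_loop lens rest segs cur' raw ei target

def partition_aligned_sequence (aligned_seq : String) (exon_lengths : List Int) : List String :=
  let target := if exon_lengths ≠ [] then exon_lengths.getD 0 0 else 0
  pvA_loop exon_lengths aligned_seq.toList [] [] 0 0 target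

-- ===== PORT B =====
-- the for-loop of B over exon_lengths, state (start, acc); pos[acc-1] is in range by the guard
def pvB_loop (chars : List Char) (pos : List Int) : List Int → Int → Int → List String
  | [], _start, _acc => []
  | L :: rest, start, acc =>
    let acc' := acc + L
    if L ≤ 0 ∨ acc' > (pos.length : Int) then []
    else
      let e : Int := pos.getD (acc' - 1).toNat 0 + 1
      String.ofList (PySem.List.slice chars (some start) (some e)) :: pvB_loop chars pos rest e acc'

def partition_aligned_sequence_alt (aligned_seq : String) (exon_lengths : List Int) : List String :=
  let chars := aligned_seq.toList
  let pos : List Int := ((PySem.List.enumerate chars 0).filter (fun p => p.2 ≠ '-')).map (fun p => p.1)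
  pvB_loop chars pos exon_lengths 0 0

-- ===== PRECONDITION & SPEC =====
def Spec_partition_aligned_sequence (aligned_seq : String) (exon_lengths : List Int) (out : List String) : Prop := out = partition_aligned_sequence_alt aligned_seq exon_lengths
instance (aligned_seq : String) (exon_lengths : List Int) (out : List String) : Decidable (Spec_partition_aligned_sequence aligned_seq exon_lengths out) := by unfold Spec_partition_aligned_sequence; infer_instance

-- ===== CLAIM (what is proved, stated in full; the proofs are below) =====
def Claim_equal_partition_aligned_sequence : Prop := ∀ (aligned_seq : String) (exon_lengths : List Int), Dom_partition_aligned_sequence aligned_seq exon_lengths → Spec_partition_aligned_sequence aligned_seq exon_lengths (partition_aligned_sequence aligned_seq exon_lengths)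

-- ===== LEMMAS AND PROOFS =====

-- common functional specification: per-exon consumption of the character stream
def pvTake : List Char → Nat → Option (List Char × List Char)
  | [], _ => none
  | c :: cs, n =>
    if c = '-' then (pvTake cs n).map (fun p => (c :: p.1, p.2))
    else if n ≤ 1 then some ([c], cs)
    else (pvTake cs (n - 1)).map (fun p => (c :: p.1, p.2))

def pvSpecA : List Char → List Char → Int → List Int → List String
  | [], _cur, _d, _rest => []
  | c :: cs, cur, d, rest =>
    if c = '-' then pvSpecA cs (cur ++ [c]) d rest
    else if d = 1 then
      String.ofList (cur ++ [c]) :: (match rest with | [] => [] | L :: r => pvSpecA cs [] L r)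
    else pvSpecA cs (cur ++ [c]) (d - 1) rest

def pvSpecTop (t : List Char) : List Int → List String
  | [] => []
  | L :: r => pvSpecA t [] L r

def pvPos : List Char → List Nat
  | [] => []
  | c :: cs => if c = '-' then (pvPos cs).map (· + 1) else 0 :: (pvPos cs).map (· + 1)

def pvCnt (t : List Char) : Nat := (t.filter (fun c => c ≠ '-')).length

lemma pvA_loop_stop (lens : List Int) (chars : List Char) (segs : List String)
    (cur : List Char) (raw : Int) (ei : Nat) (target : Int) (h : lens.length ≤ ei) :
    pvA_loop lens chars segs cur raw ei target = segs := by
  cases chars with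
  | nil => rfl
  | cons c cs => simp [pvA_loop, h]

lemma pvA_loop_spec (lens : List Int) (chars : List Char) :
    ∀ (segs : List String) (cur : List Char) (raw : Int) (ei : Nat) (target : Int),
    ei < lens.length →
    pvA_loop lens chars segs cur raw ei target
      = segs ++ pvSpecA chars cur (target - raw) (lens.drop (ei + 1)) := by
  induction chars with
  | nil => intro segs cur raw ei target h; simp [pvA_loop, pvSpecA]
  | cons c cs ih =>
    intro segs cur raw ei target h
    have hnot : ¬ ei ≥ lens.length := by omega
    by_cases hc : c = '-'
    · rw [show pvA_loop lens (c::cs) segs cur raw ei target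
          = pvA_loop lens cs segs (cur ++ [c]) raw ei target by simp [pvA_loop, hnot, hc]]
      rw [ih segs (cur ++ [c]) raw ei target h]
      simp [pvSpecA, hc]
    · by_cases hcut : raw + 1 = target
      · have hd : target - raw = 1 := by omega
        by_cases hnext : ei + 1 < lens.length
        · rw [show pvA_loop lens (c::cs) segs cur raw ei target
              = pvA_loop lens cs (segs ++ [String.ofList (cur ++ [c])]) [] (raw+1) (ei+1)
                  (target + lens.getD (ei+1) 0) by
                simp [pvA_loop, hnot, hc, hcut, hnext]]
          rw [ih _ [] (raw+1) (ei+1) _ hnext]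
          have hdrop : lens.drop (ei+1) = lens.getD (ei+1) 0 :: lens.drop (ei+2) := by
            rw [List.getD_eq_getElem _ _ hnext]
            exact List.drop_eq_getElem_cons hnext
          rw [show pvSpecA (c::cs) cur (target - raw) (lens.drop (ei+1))
              = String.ofList (cur ++ [c]) :: pvSpecA cs [] (lens.getD (ei+1) 0) (lens.drop (ei+2)) by
            rw [hdrop]; simp [pvSpecA, hc, hd]]
          have heq : target + lens.getD (ei+1) 0 - (raw + 1) = lens.getD (ei+1) 0 := by omega
          rw [heq]
          simp
        · rw [show pvA_loop lens (c::cs) segs cur raw ei target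
              = pvA_loop lens cs (segs ++ [String.ofList (cur ++ [c])]) [] (raw+1) (ei+1) target by
                simp [pvA_loop, hnot, hc, hcut, hnext]]
          rw [pvA_loop_stop _ _ _ _ _ _ _ (by omega)]
          have hdrop : lens.drop (ei+1) = [] := List.drop_eq_nil_of_le (by omega)
          rw [hdrop]
          simp [pvSpecA, hc, hd]
      · rw [show pvA_loop lens (c::cs) segs cur raw ei target
            = pvA_loop lens cs segs (cur ++ [c]) (raw+1) ei target by simp [pvA_loop, hnot, hc, hcut]]
        rw [ih segs (cur ++ [c]) (raw+1) ei target h]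
        have hne : target - raw ≠ 1 := by omega
        have heq : target - (raw+1) = target - raw - 1 := by omega
        simp [pvSpecA, hc, hne, heq]

lemma pvSpecA_take (t : List Char) :
    ∀ (cur : List Char) (d : Int) (rest : List Int),
    pvSpecA t cur d rest
      = if d ≤ 0 then []
        else match pvTake t d.toNat with
          | none => []
          | some p => String.ofList (cur ++ p.1) :: pvSpecTop p.2 rest := by
  induction t with
  | nil =>
    intro cur d rest
    by_cases hd : d ≤ 0 <;> simp [pvSpecA, pvTake, hd]
  | cons c cs ih =>
    intro cur d rest
    by_cases hd : d ≤ 0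
    · by_cases hc : c = '-'
      · rw [show pvSpecA (c :: cs) cur d rest = pvSpecA cs (cur ++ [c]) d rest by simp [pvSpecA, hc]]
        rw [ih (cur ++ [c]) d rest, if_pos hd, if_pos hd]
      · have h1 : d ≠ 1 := by omega
        rw [show pvSpecA (c :: cs) cur d rest = pvSpecA cs (cur ++ [c]) (d-1) rest by
          simp [pvSpecA, hc, h1]]
        rw [ih (cur ++ [c]) (d-1) rest, if_pos (show d - 1 ≤ 0 by omega), if_pos hd]
    · by_cases hc : c = '-'
      · rw [show pvSpecA (c :: cs) cur d rest = pvSpecA cs (cur ++ [c]) d rest by simp [pvSpecA, hc]]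
        rw [ih (cur ++ [c]) d rest]
        rw [if_neg hd, if_neg hd]
        rw [show pvTake (c :: cs) d.toNat = (pvTake cs d.toNat).map (fun p => (c :: p.1, p.2)) by
          simp [pvTake, hc]]
        cases h : pvTake cs d.toNat with
        | none => simp
        | some p => simp [List.append_assoc]
      · by_cases h1 : d = 1
        · subst h1
          rw [show pvSpecA (c :: cs) cur 1 rest
              = String.ofList (cur ++ [c]) :: (match rest with | [] => [] | L :: r => pvSpecA cs [] L r) by
            simp [pvSpecA, hc]]
          rw [if_neg hd]
          rw [show pvTake (c :: cs) (1:Int).toNat = some ([c], cs) by simp [pvTake, hc]]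
          cases rest <;> simp [pvSpecTop]
        · have hn2 : ¬ d.toNat ≤ 1 := by omega
          rw [show pvSpecA (c :: cs) cur d rest = pvSpecA cs (cur ++ [c]) (d-1) rest by
            simp [pvSpecA, hc, h1]]
          rw [ih (cur ++ [c]) (d-1) rest]
          rw [if_neg (show ¬ (d-1 ≤ 0) by omega), if_neg hd]
          rw [show (d-1).toNat = d.toNat - 1 by omega]
          rw [show pvTake (c :: cs) d.toNat = (pvTake cs (d.toNat - 1)).map (fun p => (c :: p.1, p.2)) by
            simp [pvTake, hc, hn2]]
          cases h : pvTake cs (d.toNat - 1) with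
          | none => simp
          | some p => simp [List.append_assoc]

lemma pvPos_lt (t : List Char) : ∀ x ∈ pvPos t, x < t.length := by
  induction t with
  | nil => simp [pvPos]
  | cons c cs ih =>
    intro x hx
    by_cases hc : c = '-'
    · simp only [pvPos, hc, ite_true, List.mem_map] at hx
      obtain ⟨y, hy, rfl⟩ := hx
      have := ih y hy
      simp only [List.length_cons]; omega
    · simp only [pvPos, hc, ite_false, List.mem_cons, List.mem_map] at hx
      rcases hx with rfl | ⟨y, hy, rfl⟩
      · simp
      · have := ih y hy
        simp only [List.length_cons]; omega

lemma pvTake_none (t : List Char) : ∀ n : Nat, (pvPos t).length < n → pvTake t n = none := by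
  induction t with
  | nil => intro n _; rfl
  | cons c cs ih =>
    intro n hn
    by_cases hc : c = '-'
    · simp only [pvPos, hc, ite_true, List.length_map] at hn
      simp [pvTake, hc, ih n hn]
    · simp only [pvPos, hc, ite_false, List.length_cons, List.length_map] at hn
      have h1 : ¬ n ≤ 1 := by omega
      simp [pvTake, hc, h1, ih (n-1) (by omega)]

lemma pvTake_some (t : List Char) :
    ∀ n : Nat, 1 ≤ n → n ≤ (pvPos t).length →
    pvTake t n = some (t.take ((pvPos t).getD (n - 1) 0 + 1), t.drop ((pvPos t).getD (n - 1) 0 + 1)) := by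
  induction t with
  | nil => intro n _ h2; simp [pvPos] at h2; omega
  | cons c cs ih =>
    intro n h1 h2
    by_cases hc : c = '-'
    · simp only [pvPos, hc, ite_true, List.length_map] at h2 ⊢
      have hlt : n - 1 < (pvPos cs).length := by omega
      have hg : ((pvPos cs).map (· + 1)).getD (n-1) 0 = (pvPos cs).getD (n-1) 0 + 1 := by
        rw [List.getD_eq_getElem _ _ (by simpa using hlt), List.getD_eq_getElem _ _ hlt]
        simp
      rw [hg]
      simp [pvTake, ih n h1 h2, List.take_succ_cons, List.drop_succ_cons]
    · simp only [pvPos, hc, ite_false, List.length_cons, List.length_map] at h2 ⊢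
      rcases Nat.lt_or_ge n 2 with hn | hn
      · have : n = 1 := by omega
        subst this
        simp [pvTake, hc]
      · have h1' : ¬ n ≤ 1 := by omega
        have hlt : n - 2 < (pvPos cs).length := by omega
        have hidx : n - 1 = (n - 2) + 1 := by omega
        have hg : ((0 : Nat) :: (pvPos cs).map (· + 1)).getD (n-1) 0 = (pvPos cs).getD (n-2) 0 + 1 := by
          rw [hidx]
          show ((pvPos cs).map (· + 1)).getD (n-2) 0 = _
          rw [List.getD_eq_getElem _ _ (by simpa using hlt), List.getD_eq_getElem _ _ hlt]
          simp
        rw [hg]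
        have := ih (n-1) (by omega) (by omega)
        have hidx2 : n - 1 - 1 = n - 2 := by omega
        rw [hidx2] at this
        simp [pvTake, hc, h1', this, List.take_succ_cons, List.drop_succ_cons]

lemma pvCnt_take (t : List Char) :
    ∀ j : Nat, j < (pvPos t).length → pvCnt (t.take ((pvPos t).getD j 0 + 1)) = j + 1 := by
  induction t with
  | nil => intro j h; simp [pvPos] at h
  | cons c cs ih =>
    intro j hj
    by_cases hc : c = '-'
    · simp only [pvPos, hc, ite_true, List.length_map] at hj
      have hg : ((pvPos cs).map (· + 1)).getD j 0 = (pvPos cs).getD j 0 + 1 := by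
        rw [List.getD_eq_getElem _ _ (by simpa using hj), List.getD_eq_getElem _ _ hj]
        simp
      simp only [pvPos, hc, ite_true, hg, List.take_succ_cons, pvCnt, List.filter]
      have := ih j hj
      simp [pvCnt] at this ⊢
      exact this
    · simp only [pvPos, hc, ite_false, List.length_cons, List.length_map] at hj
      cases j with
      | zero => simp [pvPos, hc, pvCnt, List.filter]
      | succ j' =>
        have hj' : j' < (pvPos cs).length := by omega
        have hg : ((0:Nat) :: (pvPos cs).map (· + 1)).getD (j'+1) 0 = (pvPos cs).getD j' 0 + 1 := by
          show ((pvPos cs).map (· + 1)).getD j' 0 = _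
          rw [List.getD_eq_getElem _ _ (by simpa using hj'), List.getD_eq_getElem _ _ hj']
          simp
        simp only [pvPos, hc, ite_false, hg, List.take_succ_cons]
        have := ih j' hj'
        simp [pvCnt, hc] at this ⊢
        omega

lemma pvPos_append (a b : List Char) :
    pvPos (a ++ b) = pvPos a ++ (pvPos b).map (· + a.length) := by
  induction a with
  | nil => simp [pvPos]
  | cons c cs ih =>
    by_cases hc : c = '-' <;>
      simp [pvPos, hc, ih, List.map_map, Function.comp_def, Nat.add_assoc]

lemma pvPos_len (t : List Char) : (pvPos t).length = pvCnt t := by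
  induction t with
  | nil => simp [pvPos, pvCnt]
  | cons c cs ih =>
    by_cases hc : c = '-' <;> simp [pvPos, pvCnt, hc, List.filter] at ih ⊢ <;> omega

lemma pvEnum_pos (chars : List Char) :
    ∀ s : Int, ((PySem.List.enumerate chars s).filter (fun p => p.2 ≠ '-')).map (fun p => p.1)
      = (pvPos chars).map (fun k : Nat => s + (k : Int)) := by
  induction chars with
  | nil => intro s; simp [PySem.List.enumerate_nil, pvPos]
  | cons c cs ih =>
    intro s
    rw [PySem.List.enumerate_cons, List.filter_cons]
    by_cases hc : c = '-'
    · rw [if_neg (by simp [hc])]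
      rw [ih (s+1)]
      simp only [pvPos, hc, ite_true, List.map_map]
      apply List.map_congr_left
      intro k _
      simp only [Function.comp_apply]
      push_cast; ring
    · rw [if_pos (by simp [hc])]
      rw [List.map_cons, ih (s+1)]
      simp only [pvPos, hc, ite_false, List.map_cons, List.map_map]
      refine congrArg₂ _ (by simp) ?_
      apply List.map_congr_left
      intro k _
      simp only [Function.comp_apply]
      push_cast; ring

lemma pvB_loop_spec (chars : List Char) (lens : List Int) :
    ∀ (start acc : Nat), start ≤ chars.length → acc = pvCnt (chars.take start) →
    pvB_loop chars ((pvPos chars).map (fun k : Nat => (k : Int))) lens (start : Int) (acc : Int)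
      = pvSpecTop (chars.drop start) lens := by
  induction lens with
  | nil => intro start acc _ _; rfl
  | cons L rest ih =>
    intro start acc hstart hacc
    have hsplit : chars = chars.take start ++ chars.drop start := (List.take_append_drop start chars).symm
    have hlena : (chars.take start).length = start := by simp [List.length_take]; omega
    have hP : pvPos chars = pvPos (chars.take start) ++ (pvPos (chars.drop start)).map (· + start) := by
      conv_lhs => rw [hsplit]
      rw [pvPos_append, hlena]
    have hacc' : (pvPos (chars.take start)).length = acc := by rw [pvPos_len, hacc]
    have hPlen : (pvPos chars).length = acc + (pvPos (chars.drop start)).length := by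
      rw [hP]; simp [hacc']
    rw [show pvSpecTop (chars.drop start) (L :: rest) = pvSpecA (chars.drop start) [] L rest from rfl]
    rw [pvSpecA_take]
    by_cases hL : L ≤ 0
    · rw [if_pos hL]
      simp only [pvB_loop]
      rw [if_pos (Or.inl hL)]
    · rw [if_neg hL]
      by_cases hbig : (acc : Int) + L > (((pvPos chars).map (fun k : Nat => (k : Int))).length : Int)
      · have hqlt : (pvPos (chars.drop start)).length < L.toNat := by
          simp only [List.length_map, hPlen] at hbig
          omega
        rw [pvTake_none (chars.drop start) L.toNat hqlt]
        simp only [pvB_loop]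
        rw [if_pos (Or.inr hbig)]
      · have hq1 : 1 ≤ L.toNat := by omega
        have hq2 : L.toNat ≤ (pvPos (chars.drop start)).length := by
          simp only [List.length_map, hPlen] at hbig
          omega
        have hjlt : L.toNat - 1 < (pvPos (chars.drop start)).length := by omega
        have hmlt : (pvPos (chars.drop start)).getD (L.toNat - 1) 0 < (chars.drop start).length := by
          rw [List.getD_eq_getElem _ _ hjlt]
          exact pvPos_lt _ _ (List.getElem_mem hjlt)
      
        rw [pvTake_some (chars.drop start) L.toNat hq1 hq2]
        have hidx : ((acc : Int) + L - 1).toNat = acc + (L.toNat - 1) := by omega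
        have hgetP : (pvPos chars).getD (acc + (L.toNat - 1)) 0
            = (pvPos (chars.drop start)).getD (L.toNat - 1) 0 + start := by
          rw [hP]
          rw [List.getD_eq_getElem _ _ (by simp only [List.length_append, List.length_map, hacc']; omega)]
          rw [List.getElem_append_right (by omega)]
          rw [List.getD_eq_getElem _ _ hjlt]
          simp [hacc']
        have hE : (((pvPos chars).map (fun k : Nat => (k : Int))).getD ((acc : Int) + L - 1).toNat 0 + 1 : Int)
            = ((start + (pvPos (chars.drop start)).getD (L.toNat - 1) 0 + 1 : Nat) : Int) := by
          rw [hidx]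
          rw [List.getD_eq_getElem _ _ (by simp only [List.length_map, hPlen]; omega)]
          rw [List.getElem_map]
          rw [← List.getD_eq_getElem (pvPos chars) 0 (by simp only [hPlen]; omega)]
          rw [hgetP]
          push_cast; ring
        have hguard : ¬ (L ≤ 0 ∨ (acc : Int) + L > (((pvPos chars).map (fun k : Nat => (k : Int))).length : Int)) :=
          not_or.mpr ⟨hL, hbig⟩
        simp only [pvB_loop]
        rw [if_neg hguard, hE]
        have hslice : PySem.List.slice chars (some (start : Int))
            (some ((start + (pvPos (chars.drop start)).getD (L.toNat - 1) 0 + 1 : Nat) : Int))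
            = (chars.drop start).take ((pvPos (chars.drop start)).getD (L.toNat - 1) 0 + 1) := by
          rw [PySem.List.slice_natCast]
          congr 1
          omega
        rw [hslice]
        have hcast : (acc : Int) + L = ((acc + L.toNat : Nat) : Int) := by push_cast; omega
        rw [hcast]
        rw [ih (start + (pvPos (chars.drop start)).getD (L.toNat - 1) 0 + 1) (acc + L.toNat)
          (by simp only [List.length_drop] at hmlt; omega)
          (by
            rw [show start + (pvPos (chars.drop start)).getD (L.toNat - 1) 0 + 1
                = start + ((pvPos (chars.drop start)).getD (L.toNat - 1) 0 + 1) by omega]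
            rw [List.take_add]
            have hcnt2 := pvCnt_take (chars.drop start) (L.toNat - 1) hjlt
            simp only [pvCnt, List.filter_append, List.length_append] at hcnt2 ⊢
            rw [hcnt2]
            simp only [pvCnt] at hacc
            omega)]
        have hdd : chars.drop (start + (pvPos (chars.drop start)).getD (L.toNat - 1) 0 + 1)
            = (chars.drop start).drop ((pvPos (chars.drop start)).getD (L.toNat - 1) 0 + 1) := by
          rw [List.drop_drop, Nat.add_assoc]
        rw [hdd]
        simp

-- ===== VERDICT (by name: the statement is the Claim_ definition above) =====
theorem partition_aligned_sequence_spec : Claim_equal_partition_aligned_sequence := by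
  intro s lens _
  unfold Spec_partition_aligned_sequence partition_aligned_sequence partition_aligned_sequence_alt
  simp only []
  rw [pvEnum_pos s.toList 0]
  have hmap : (pvPos s.toList).map (fun k : Nat => (0 : Int) + (k : Int))
      = (pvPos s.toList).map (fun k : Nat => (k : Int)) := by
    apply List.map_congr_left; intro k _; ring
  rw [hmap]
  cases lens with
  | nil =>
    rw [pvA_loop_stop _ _ _ _ _ _ _ (by simp)]
    rfl
  | cons L r =>
    rw [show (if (L :: r : List Int) ≠ [] then (L :: r).getD 0 0 else 0) = L by simp]
    rw [pvA_loop_spec (L :: r) s.toList [] [] 0 0 L (by simp)]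
    rw [show ((0 : Int)) = ((0 : Nat) : Int) from rfl]
    rw [pvB_loop_spec s.toList (L :: r) 0 0 (by simp) (by simp [pvCnt])]
    simp [pvSpecTop]
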